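-- pv_equiv track=rewrite | github.com/stadt-karlsruhe/geoextract | tests/test_geoextract.py | debug_string
-- ===== SOURCE A (Python) =====
-- def debug_string(s):
--     '''
--     Format a string for debugging output.
--     '''
--     if not s:
--         return '<empty>'
--     parts = []
--     for c in s:
--         if c == ' ':
--             parts.append('.')
--         elif c == '\t':
--             parts.append('#')
--         elif c == '\n':
--             parts.append('\\\n')
--         else:
--             parts.append(c)
--     return ''.join(parts)
-- ===== SOURCE B (Python) =====
-- def debug_string(s):
--     '''
--     Format a string for debugging output.
--     '''
--     if not s:
--         return '<empty>'
--     # Three staged whole-string passes; '\n' is rewritten last, so the '\n'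
--     # inside its replacement '\\\n' is never re-processed.
--     return s.replace(' ', '.').replace('\t', '#').replace('\n', '\\\n')
-- ===== Notes on version B (the rewrite author's own statement) =====
-- stated objective: idiomatic
-- what changed: Replaces the explicit per-character loop with if/elif branches and a parts list by three staged whole-string str.replace passes, ordered so the newline replacement comes last and is never re-processed.
import Mathlib
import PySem

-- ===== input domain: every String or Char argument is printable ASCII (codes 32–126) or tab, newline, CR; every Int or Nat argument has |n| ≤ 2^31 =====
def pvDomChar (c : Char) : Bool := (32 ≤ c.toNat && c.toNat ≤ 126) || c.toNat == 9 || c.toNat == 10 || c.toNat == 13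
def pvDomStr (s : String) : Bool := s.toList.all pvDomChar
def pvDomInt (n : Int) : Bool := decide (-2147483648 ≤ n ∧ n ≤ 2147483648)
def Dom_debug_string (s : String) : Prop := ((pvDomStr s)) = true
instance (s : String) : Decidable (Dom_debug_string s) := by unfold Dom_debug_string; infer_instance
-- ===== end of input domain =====

-- B replaces A's single per-character loop (if/elif branches into a parts list) by
-- three staged whole-string str.replace passes; objective: idiomatic.

-- ===== PORT A =====
-- A: explicit loop accumulating a parts list via if/elif branches, then ''.join(parts).
def debug_string (s : String) : String :=
  if s = "" then "<empty>"
  else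
    let parts := s.toList.foldl (fun (parts : List String) c =>
      if c = ' ' then parts ++ ["."]
      else if c = '\t' then parts ++ ["#"]
      else if c = '\n' then parts ++ ["\\\n"]
      else parts ++ [String.ofList [c]]) []
    PySem.Str.join "" parts

-- ===== PORT B =====
-- B: empty guard, then three chained str.replace passes ('\n' last, so its
-- replacement '\\\n' is never re-processed).
def debug_string_alt (s : String) : String :=
  if s = "" then "<empty>"
  else PySem.Str.replace (PySem.Str.replace (PySem.Str.replace s " " ".") "\t" "#") "\n" "\\\n"

-- ===== PRECONDITION & SPEC =====
def Spec_debug_string (s : String) (out : String) : Prop := out = debug_string_alt s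
instance (s : String) (out : String) : Decidable (Spec_debug_string s out) := by unfold Spec_debug_string; infer_instance

-- ===== CLAIM (what is proved, stated in full; the proofs are below) =====
def Claim_equal_debug_string : Prop := ∀ (s : String), Dom_debug_string s → Spec_debug_string s (debug_string s)

-- ===== LEMMAS AND PROOFS =====

-- replace with a single-character pattern is a flatMap over the characters
theorem replace_single_go (a : Char) (new : List Char) :
    ∀ (fuel : Nat) (l acc : List Char), l.length ≤ fuel →
      PySem.Chars.replace.go [a] new fuel l acc
        = acc.reverse ++ l.flatMap (fun c => if c = a then new else [c]) := by
  intro fuel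
  induction fuel with
  | zero =>
    intro l acc h
    have : l = [] := List.length_eq_zero_iff.mp (Nat.le_zero.mp h)
    subst this
    simp [PySem.Chars.replace.go]
  | succ n ih =>
    intro l acc h
    cases l with
    | nil => simp [PySem.Chars.replace.go]
    | cons c t =>
      rw [PySem.Chars.replace.go]
      by_cases hc : c = a
      · have hpre : List.isPrefixOf [a] (c :: t) = true := by
          simp [List.isPrefixOf, hc]
        rw [hpre]
        simp only [if_true]
        rw [ih _ _ (by simpa using Nat.le_of_succ_le_succ h)]
        simp [hc]
      · have hpre : List.isPrefixOf [a] (c :: t) = false := by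
          simp [List.isPrefixOf]; exact fun h' => hc h'.symm
        rw [hpre]
        simp only [Bool.false_eq_true, if_false]
        rw [ih _ _ (Nat.le_of_succ_le_succ h)]
        simp [hc]

theorem replace_single (a : Char) (new s : List Char) :
    PySem.Chars.replace s [a] new = s.flatMap (fun c => if c = a then new else [c]) := by
  rw [PySem.Chars.replace]
  simp only [List.isEmpty_cons, Bool.false_eq_true, if_false]
  exact replace_single_go a new s.length s [] le_rfl

-- the per-character replacement A performs, as a list of characters
def pvRep (c : Char) : List Char :=
  if c = ' ' then ['.']
  else if c = '\t' then ['#']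
  else if c = '\n' then ['\\', '\n']
  else [c]

theorem foldA (cs : List Char) (acc : List String) :
    cs.foldl (fun (parts : List String) c =>
      if c = ' ' then parts ++ ["."]
      else if c = '\t' then parts ++ ["#"]
      else if c = '\n' then parts ++ ["\\\n"]
      else parts ++ [String.ofList [c]]) acc
    = acc ++ cs.map (fun c => String.ofList (pvRep c)) := by
  induction cs generalizing acc with
  | nil => simp
  | cons c t ih =>
    simp only [List.foldl_cons, ih]
    by_cases h1 : c = ' '
    · simp [h1, pvRep]
    · by_cases h2 : c = '\t'
      · simp [h2, pvRep]
      · by_cases h3 : c = '\n'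
        · simp [h3, pvRep]
        · simp [h1, h2, h3, pvRep]

theorem join_empty_flatten (l : List (List Char)) :
    PySem.Chars.join [] l = l.flatten := by
  induction l with
  | nil => rfl
  | cons a t ih =>
    cases t with
    | nil => simp [PySem.Chars.join, List.intercalate]
    | cons b t' => simp_all [PySem.Chars.join, List.intercalate]

-- composing the three single-character flatMaps gives pvRep
theorem three_passes (cs : List Char) :
    ((cs.flatMap (fun c => if c = ' ' then ['.'] else [c])).flatMap
        (fun c => if c = '\t' then ['#'] else [c])).flatMap
        (fun c => if c = '\n' then ['\\', '\n'] else [c])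
      = cs.flatMap pvRep := by
  rw [List.flatMap_assoc, List.flatMap_assoc]
  apply List.flatMap_congr
  intro c _
  by_cases h1 : c = ' '
  · simp [h1, pvRep]
  · by_cases h2 : c = '\t'
    · simp [h2, pvRep]
    · by_cases h3 : c = '\n'
      · simp [h3, pvRep]
      · simp [h1, h2, h3, pvRep]

-- ===== VERDICT (by name: the statement is the Claim_ definition above) =====
theorem debug_string_spec : Claim_equal_debug_string := by
  intro s _
  unfold Spec_debug_string debug_string debug_string_alt
  by_cases h : s = ""
  · simp [h]
  · simp only [h, if_false]
    apply String.toList_inj.mp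
    rw [foldA, List.nil_append]
    rw [PySem.Str.toList_join]
    rw [show (List.map String.toList (s.toList.map (fun c => String.ofList (pvRep c))))
        = s.toList.map pvRep by simp]
    rw [show ("" : String).toList = [] from rfl, join_empty_flatten]
    simp only [PySem.Str.toList_replace]
    rw [show (" " : String).toList = [' '] from rfl, show ("." : String).toList = ['.'] from rfl,
        show ("\t" : String).toList = ['\t'] from rfl, show ("#" : String).toList = ['#'] from rfl,
        show ("\n" : String).toList = ['\n'] from rfl, show ("\\\n" : String).toList = ['\\', '\n'] from rfl]
    rw [replace_single, replace_single, replace_single, three_passes]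
    simp [List.flatMap]
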